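-- pv_equiv track=rewrite | github.com/yingshaoxo/yingshaoxo_txt_data | yingshaoxo_ai.py | search_text_in_text_list
-- ===== SOURCE A (Python) =====
-- def get_sub_sentence_list_from_end_to_begin_and_begin_to_end(input_text, no_single_char=True, char_limit=True):
--     input_text = input_text.strip()
--     full_length = len(input_text)
--     if char_limit == True:
--         char_limit_number = int(full_length / 2)
--     else:
--         char_limit_number = 1
--     result_list = []
--     for i in range(full_length):
--         end_to_begin_sub_string = input_text[i:]
--         begin_to_end_sub_string = input_text[:-i]
--         if no_single_char == True:
--             if len(end_to_begin_sub_string) > char_limit_number: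
--                 result_list.append(end_to_begin_sub_string)
--             if len(begin_to_end_sub_string) > char_limit_number:
--                 result_list.append(begin_to_end_sub_string)
--         else:
--             result_list.append(end_to_begin_sub_string)
--             result_list.append(begin_to_end_sub_string)
--     result_list_2 = []
--     for one in result_list:
--         if one not in result_list_2:
--             result_list_2.append(one)
--     return result_list_2
--
-- def search_text_in_text_list(search_text, source_text_list):
--     longest_first_sub_sentence_list = get_sub_sentence_list_from_end_to_begin_and_begin_to_end(search_text)
--     useful_source_text_list = []
--     for sub_sentence in longest_first_sub_sentence_list:
--         for one in source_text_list:
--             if sub_sentence in one: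
--                 useful_source_text_list.append(one)
--         if len(useful_source_text_list) != 0:
--             return useful_source_text_list
--
--     return []
-- ===== SOURCE B (Python) =====
-- def search_text_in_text_list(search_text, source_text_list):
--     # Inverted algorithm: instead of trying candidate substrings in order and
--     # scanning sources for each, compute for EVERY source a single numeric rank
--     # (the priority of the best candidate it contains), then return the sources
--     # achieving the overall minimum rank.  Candidate priorities: suffix text[i:]
--     # has rank 2*i, prefix text[:n-i] has rank 2*i+1; only candidates longer
--     # than n//2 count.
--     text = search_text.strip()
--     n = len(text)
--     keep = n - n // 2          # candidates longer than the threshold n // 2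
--     INF = 2 * n + 2
--
--     def score(source):
--         best = INF
--         for i in range(keep):
--             if text[i:] in source:
--                 best = 2 * i
--                 break
--         for i in range(1, keep):
--             if text[:n - i] in source:
--                 best = min(best, 2 * i + 1)
--                 break
--         return best
--
--     scores = [score(source) for source in source_text_list]
--     m = min(scores, default=INF)
--     if m == INF:
--         return []
--     return [s for s, sc in zip(source_text_list, scores) if sc == m]
-- ===== Notes on version B (the rewrite author's own statement) =====
-- stated objective: alternative
-- what changed: Inverts the control structure: instead of trying candidate substrings in priority order and scanning all sources per candidate with an early return, B computes one numeric rank per source (priority of the best candidate that source contains, suffix text[i:] -> 2i, prefix text[:n-i] -> 2i+1) in a single pass over the sources, then returns the sources achieving the minimum rank.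
import Mathlib
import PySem

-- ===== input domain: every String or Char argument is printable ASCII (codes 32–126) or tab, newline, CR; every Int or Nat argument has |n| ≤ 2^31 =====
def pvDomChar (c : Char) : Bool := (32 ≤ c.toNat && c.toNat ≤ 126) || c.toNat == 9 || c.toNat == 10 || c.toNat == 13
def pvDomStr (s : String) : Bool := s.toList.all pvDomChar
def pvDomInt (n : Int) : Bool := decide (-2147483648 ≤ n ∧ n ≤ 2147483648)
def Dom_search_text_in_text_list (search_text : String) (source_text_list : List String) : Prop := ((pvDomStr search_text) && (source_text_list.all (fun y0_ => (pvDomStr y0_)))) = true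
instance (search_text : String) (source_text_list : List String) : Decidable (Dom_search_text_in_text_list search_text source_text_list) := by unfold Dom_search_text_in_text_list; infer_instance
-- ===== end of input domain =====

-- B inverts the control structure: it scores every source once (rank of the best candidate
-- substring the source contains) and returns the sources achieving the minimum rank, instead of
-- A's candidate-major loop (build all candidates, dedup, scan sources per candidate, early return).

-- ===== PORT A =====
-- port of get_sub_sentence_list_from_end_to_begin_and_begin_to_end; substrings kept as List Char
-- (int(full_length / 2) ported as Nat division full_length / 2, exact for these lengths)
-- the generation for-loop of the helper, carrying result_list
def pvGenLoop (t : List Char) (no_single_char : Bool) (lim : Nat) (acc : List (List Char)) :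
    List Int → List (List Char)
  | [] => acc
  | i :: rest =>
    let end_to_begin := PySem.List.slice t (some i) none
    let begin_to_end := PySem.List.slice t none (some (-i))
    if no_single_char = true then
      let acc := if end_to_begin.length > lim then acc ++ [end_to_begin] else acc
      let acc := if begin_to_end.length > lim then acc ++ [begin_to_end] else acc
      pvGenLoop t no_single_char lim acc rest
    else
      pvGenLoop t no_single_char lim (acc ++ [end_to_begin] ++ [begin_to_end]) rest

-- the dedup for-loop of the helper, carrying result_list_2
def pvDedupLoop (acc : List (List Char)) : List (List Char) → List (List Char)
  | [] => acc
  | one :: rest => pvDedupLoop (if one ∈ acc then acc else acc ++ [one]) rest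

def pvSubSentences (input_text : String) (no_single_char : Bool) (char_limit : Bool) : List (List Char) :=
  let t := PySem.Chars.strip input_text.toList
  let full_length := t.length
  let char_limit_number := if char_limit = true then full_length / 2 else 1
  let result_list := pvGenLoop t no_single_char char_limit_number []
    (PySem.List.pyRange 0 (full_length : Int) 1)
  pvDedupLoop [] result_list

-- the outer for-loop of A with early return, carrying useful_source_text_list
def pvSearchLoop (source_text_list : List String) (useful : List String) : List (List Char) → List String
  | [] => []
  | sub :: rest =>
    let useful := source_text_list.foldl
      (fun acc one => if PySem.Chars.isIn sub one.toList then acc ++ [one] else acc) useful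
    if useful.length ≠ 0 then useful else pvSearchLoop source_text_list useful rest

def search_text_in_text_list (search_text : String) (source_text_list : List String) : List String :=
  pvSearchLoop source_text_list [] (pvSubSentences search_text true true)

-- ===== PORT B =====
-- Source B's first scoring loop (over i in range(keep), break at the first suffix hit)
def pvScoreLoop1 (text source : List Char) : List Int → Int → Int
  | [], best => best
  | i :: rest, best =>
    if PySem.Chars.isIn (PySem.List.slice text (some i) none) source = true then 2 * i
    else pvScoreLoop1 text source rest best

-- Source B's second scoring loop (over i in range(1, keep), break at the first prefix hit)
def pvScoreLoop2 (text source : List Char) (n : Int) : List Int → Int → Int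
  | [], best => best
  | i :: rest, best =>
    if PySem.Chars.isIn (PySem.List.slice text none (some (n - i))) source = true then
      min best (2 * i + 1)
    else pvScoreLoop2 text source n rest best

def pvScore (text : List Char) (n keep inf : Int) (source : List Char) : Int :=
  let best := inf
  let best := pvScoreLoop1 text source (PySem.List.pyRange 0 keep 1) best
  pvScoreLoop2 text source n (PySem.List.pyRange 1 keep 1) best

def search_text_in_text_list_alt (search_text : String) (source_text_list : List String) : List String :=
  let text := PySem.Chars.strip search_text.toList
  let n : Int := text.length
  let keep := n - PySem.Int.floordiv n 2
  let inf := 2 * n + 2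
  let scores := source_text_list.map (fun source => pvScore text n keep inf source.toList)
  let m := PySem.List.minD scores (fun x => x) inf
  if m = inf then []
  else ((source_text_list.zip scores).filter (fun p => p.2 == m)).map Prod.fst

-- ===== PRECONDITION & SPEC =====
def Spec_search_text_in_text_list (search_text : String) (source_text_list : List String) (out : List String) : Prop := out = search_text_in_text_list_alt search_text source_text_list
instance (search_text : String) (source_text_list : List String) (out : List String) : Decidable (Spec_search_text_in_text_list search_text source_text_list out) := by unfold Spec_search_text_in_text_list; infer_instance

-- ===== CLAIM (what is proved, stated in full; the proofs are below) =====
def Claim_equal_search_text_in_text_list : Prop := ∀ (search_text : String) (source_text_list : List String), Dom_search_text_in_text_list search_text source_text_list → Spec_search_text_in_text_list search_text source_text_list (search_text_in_text_list search_text source_text_list)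

-- ===== LEMMAS AND PROOFS =====

-- a source contains a candidate
def pvCont (c : List Char) (s : String) : Bool := PySem.Chars.isIn c s.toList

-- the sources a candidate matches
def pvMatches (srcs : List String) (c : List Char) : List String :=
  srcs.filter (fun s => pvCont c s)

-- abstract first-match search over a candidate list
def pvSearch (srcs : List String) : List (List Char) → List String
  | [] => []
  | c :: rest => if pvMatches srcs c = [] then pvSearch srcs rest else pvMatches srcs c

-- min on Option Int, none = +infinity
def pvOmin : Option Int → Option Int → Option Int
  | none, b => b
  | some x, none => some x
  | some x, some y => some (min x y)

-- minimum rank (in a ranked candidate list) of a candidate contained in s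
def pvM0 (R : List (Int × List Char)) (s : String) : Option Int :=
  R.foldr (fun p acc => if pvCont p.2 s then pvOmin (some p.1) acc else acc) none

-- minimum over the sources of pvM0
def pvFold (g : String → Option Int) (srcs : List String) : Option Int :=
  srcs.foldr (fun s acc => pvOmin (g s) acc) none

-- A's candidate list (no_single_char = char_limit = true), without ranks
def pvGen (t : List Char) (thr : Nat) : List Int → List (List Char)
  | [] => []
  | i :: rest =>
    (if (PySem.List.slice t (some i) none).length > thr
       then [PySem.List.slice t (some i) none] else [])
    ++ (if (PySem.List.slice t none (some (-i))).length > thr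
       then [PySem.List.slice t none (some (-i))] else [])
    ++ pvGen t thr rest

-- A's candidate list with ranks: suffix at i ↦ 2i, prefix at i ↦ 2i+1
def pvRankGen (t : List Char) (thr : Nat) : List Int → List (Int × List Char)
  | [] => []
  | i :: rest =>
    (if (PySem.List.slice t (some i) none).length > thr
       then [(2 * i, PySem.List.slice t (some i) none)] else [])
    ++ (if (PySem.List.slice t none (some (-i))).length > thr
       then [(2 * i + 1, PySem.List.slice t none (some (-i)))] else [])
    ++ pvRankGen t thr rest

-- the suffix / prefix parts of pvRankGen
def pvSufPart (t : List Char) (thr : Nat) : List Int → List (Int × List Char)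
  | [] => []
  | i :: rest =>
    (if (PySem.List.slice t (some i) none).length > thr
       then [(2 * i, PySem.List.slice t (some i) none)] else [])
    ++ pvSufPart t thr rest

def pvPrePart (t : List Char) (thr : Nat) : List Int → List (Int × List Char)
  | [] => []
  | i :: rest =>
    (if (PySem.List.slice t none (some (-i))).length > thr
       then [(2 * i + 1, PySem.List.slice t none (some (-i)))] else [])
    ++ pvPrePart t thr rest

-- the ranked candidate lists B's two loops walk
def pvRsuf (t : List Char) (keep : Int) : List (Int × List Char) :=
  (PySem.List.pyRange 0 keep 1).map (fun i => (2 * i, PySem.List.slice t (some i) none))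

def pvRpre (t : List Char) (n keep : Int) : List (Int × List Char) :=
  (PySem.List.pyRange 1 keep 1).map (fun i => (2 * i + 1, PySem.List.slice t none (some (n - i))))

lemma pvMatches_eq (srcs : List String) (c : List Char) :
    pvMatches srcs c = srcs.filter (fun s => pvCont c s) := rfl

lemma pvFoldl_matches (srcs : List String) (c : List Char) (acc : List String) :
    srcs.foldl (fun acc one => if PySem.Chars.isIn c one.toList then acc ++ [one] else acc) acc
      = acc ++ pvMatches srcs c := by
  simpa [pvMatches, pvCont] using
    PySem.List.foldl_append_if_eq_filter (l := srcs) (acc := acc)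
      (p := fun s => PySem.Chars.isIn c s.toList)

lemma pvSearchLoop_eq (srcs : List String) (l : List (List Char)) :
    pvSearchLoop srcs [] l = pvSearch srcs l := by
  induction l with
  | nil => rfl
  | cons c rest ih =>
    simp only [pvSearchLoop, pvSearch, pvFoldl_matches, List.nil_append]
    by_cases h : pvMatches srcs c = []
    · simp [h, ih]
    · simp [h, List.length_eq_zero_iff]

lemma pvSearch_append (srcs : List String) (l1 l2 : List (List Char)) :
    pvSearch srcs (l1 ++ l2)
      = if pvSearch srcs l1 = [] then pvSearch srcs l2 else pvSearch srcs l1 := by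
  induction l1 with
  | nil => simp [pvSearch]
  | cons c rest ih =>
    by_cases h : pvMatches srcs c = [] <;> simp [pvSearch, h, ih]

lemma pvSearch_all_empty (srcs : List String) (l : List (List Char))
    (h : ∀ c ∈ l, pvMatches srcs c = []) : pvSearch srcs l = [] := by
  induction l with
  | nil => rfl
  | cons c rest ih =>
    simp [pvSearch, h c (by simp), ih (fun x hx => h x (by simp [hx]))]

lemma pvDedupLoop_prefix (l : List (List Char)) (acc : List (List Char)) :
    ∃ r, pvDedupLoop acc l = acc ++ r := by
  induction l generalizing acc with
  | nil => exact ⟨[], by simp [pvDedupLoop]⟩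
  | cons x rest ih =>
    by_cases hx : x ∈ acc
    · simpa [pvDedupLoop, hx] using ih acc
    · obtain ⟨r, hr⟩ := ih (acc ++ [x])
      exact ⟨[x] ++ r, by simp [pvDedupLoop, hx, hr]⟩

-- deduplication does not change the first-match search
lemma pvSearch_dedup (srcs : List String) (l : List (List Char)) (acc : List (List Char))
    (h : ∀ c ∈ acc, pvMatches srcs c = []) :
    pvSearch srcs (pvDedupLoop acc l) = pvSearch srcs l := by
  induction l generalizing acc with
  | nil => exact pvSearch_all_empty srcs acc h
  | cons x rest ih =>
    by_cases hx : x ∈ acc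
    · have hxm : pvMatches srcs x = [] := h x hx
      simp only [pvDedupLoop, if_pos hx, pvSearch, hxm, if_pos]
      exact ih acc h
    · by_cases hm : pvMatches srcs x = []
      · have h' : ∀ c ∈ acc ++ [x], pvMatches srcs c = [] := by
          intro c hc
          rcases List.mem_append.mp hc with hc | hc
          · exact h c hc
          · simp at hc; subst hc; exact hm
        simp only [pvDedupLoop, if_neg hx, pvSearch, hm, if_pos]
        exact ih (acc ++ [x]) h'
      · obtain ⟨r, hr⟩ := pvDedupLoop_prefix rest (acc ++ [x])
        simp only [pvDedupLoop, if_neg hx, hr, pvSearch, hm]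
        rw [List.append_assoc, pvSearch_append, pvSearch_append,
          pvSearch_all_empty srcs acc h]
        simp [pvSearch, hm]

-- A's generation loop (no_single_char = true) produces exactly the guarded candidates
lemma pvGenLoop_true (t : List Char) (lim : Nat) (idxs : List Int) (acc : List (List Char)) :
    pvGenLoop t true lim acc idxs = acc ++ pvGen t lim idxs := by
  induction idxs generalizing acc with
  | nil => simp [pvGenLoop, pvGen]
  | cons i rest ih =>
    simp only [pvGenLoop, pvGen]
    rw [ih]
    by_cases he : (PySem.List.slice t (some i) none).length > lim <;>
      by_cases hb : (PySem.List.slice t none (some (-i))).length > lim <;>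
      simp [he, hb]

-- ---- pvOmin / pvM0 toolbox ----

lemma pvOmin_shuffle' (a b c d : Option Int) :
    pvOmin (pvOmin a b) (pvOmin c d) = pvOmin (pvOmin a c) (pvOmin b d) := by
  cases a <;> cases b <;> cases c <;> cases d <;> simp [pvOmin] <;> omega

lemma pvM0_nil (s : String) : pvM0 [] s = none := rfl

lemma pvM0_cons (p : Int × List Char) (R : List (Int × List Char)) (s : String) :
    pvM0 (p :: R) s = if pvCont p.2 s then pvOmin (some p.1) (pvM0 R s) else pvM0 R s := rfl

lemma pvM0_append (R1 R2 : List (Int × List Char)) (s : String) :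
    pvM0 (R1 ++ R2) s = pvOmin (pvM0 R1 s) (pvM0 R2 s) := by
  induction R1 with
  | nil => simp [pvM0_nil, pvOmin]
  | cons p R1 ih =>
    rw [List.cons_append, pvM0_cons, pvM0_cons, ih]
    by_cases h : pvCont p.2 s = true
    · simp only [h, if_pos]
      cases hx : pvM0 R1 s <;> cases hy : pvM0 R2 s <;> simp [pvOmin]
    · simp [h]

lemma pvM0_mem (R : List (Int × List Char)) (s : String) :
    ∀ v : Int, pvM0 R s = some v → ∃ p ∈ R, p.1 = v := by
  induction R with
  | nil => intro v h; simp [pvM0_nil] at h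
  | cons p R ih =>
    intro v h
    rw [pvM0_cons] at h
    by_cases hc : pvCont p.2 s = true
    · rw [if_pos hc] at h
      cases hr : pvM0 R s with
      | none => rw [hr] at h; simp [pvOmin] at h; exact ⟨p, by simp, by omega⟩
      | some w =>
        rw [hr] at h
        simp only [pvOmin, Option.some.injEq] at h
        rcases le_total p.1 w with hle | hle
        · exact ⟨p, by simp, by omega⟩
        · obtain ⟨q, hq, hqv⟩ := ih w hr
          exact ⟨q, by simp [hq], by omega⟩
    · rw [if_neg hc] at h
      obtain ⟨q, hq, hqv⟩ := ih v h
      exact ⟨q, by simp [hq], hqv⟩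

-- with strictly increasing ranks, the minimum contained rank is the first contained rank
lemma pvM0_findSome (R : List (Int × List Char)) (s : String)
    (hinc : List.Pairwise (fun p q : Int × List Char => p.1 < q.1) R) :
    pvM0 R s = R.findSome? (fun p => if pvCont p.2 s then some p.1 else none) := by
  induction R with
  | nil => rfl
  | cons p R ih =>
    rw [List.pairwise_cons] at hinc
    rw [pvM0_cons, List.findSome?_cons]
    by_cases hc : pvCont p.2 s = true
    · rw [if_pos hc, if_pos hc]
      cases hr : pvM0 R s with
      | none => simp [pvOmin]
      | some w =>
        obtain ⟨q, hq, hqv⟩ := pvM0_mem R s w hr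
        have : p.1 < w := hqv ▸ hinc.1 q hq
        simp [pvOmin]; omega
    · rw [if_neg hc, if_neg hc]
      exact ih hinc.2

lemma pvFold_congr (g g' : String → Option Int) (srcs : List String)
    (h : ∀ s ∈ srcs, g s = g' s) : pvFold g srcs = pvFold g' srcs := by
  induction srcs with
  | nil => rfl
  | cons s rest ih =>
    simp only [pvFold, List.foldr_cons] at *
    rw [h s (by simp), ih (fun x hx => h x (by simp [hx]))]

lemma pvFold_none (g : String → Option Int) (srcs : List String)
    (h : ∀ s ∈ srcs, g s = none) : pvFold g srcs = none := by
  induction srcs with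
  | nil => rfl
  | cons s rest ih =>
    simp only [pvFold, List.foldr_cons] at *
    rw [h s (by simp), ih (fun x hx => h x (by simp [hx]))]
    rfl

lemma pvFold_lb (g : String → Option Int) (srcs : List String) (r : Int)
    (hlb : ∀ s ∈ srcs, ∀ v, g s = some v → r ≤ v) :
    ∀ w, pvFold g srcs = some w → r ≤ w := by
  induction srcs with
  | nil => intro w h; simp [pvFold] at h
  | cons s rest ih =>
    intro w h
    simp only [pvFold, List.foldr_cons] at h
    have ih' := ih (fun a ha v hv => hlb a (by simp [ha]) v hv)
    cases hx : g s with
    | none =>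
      rw [hx] at h
      exact ih' w (by simpa [pvOmin, pvFold] using h)
    | some u =>
      have hu : r ≤ u := hlb s (by simp) u hx
      rw [hx] at h
      cases hy : rest.foldr (fun s acc => pvOmin (g s) acc) none with
      | none => rw [hy] at h; simp [pvOmin] at h; omega
      | some z =>
        have hz : r ≤ z := ih' z hy
        rw [hy] at h; simp [pvOmin] at h; omega

lemma pvFold_min (g : String → Option Int) (srcs : List String) (s0 : String) (r : Int)
    (hs0 : s0 ∈ srcs) (hg : g s0 = some r)
    (hlb : ∀ s ∈ srcs, ∀ v, g s = some v → r ≤ v) :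
    pvFold g srcs = some r := by
  induction srcs with
  | nil => simp at hs0
  | cons s rest ih =>
    simp only [pvFold, List.foldr_cons]
    rcases List.mem_cons.mp hs0 with h | h
    · subst h
      rw [hg]
      cases hr : rest.foldr (fun s acc => pvOmin (g s) acc) none with
      | none => rfl
      | some w =>
        have hw : r ≤ w :=
          pvFold_lb g rest r (fun a ha v hv => hlb a (by simp [ha]) v hv) w hr
        simp [pvOmin]; omega
    · have hrec : pvFold g rest = some r :=
        ih h (fun a ha v hv => hlb a (by simp [ha]) v hv)
      simp only [pvFold] at hrec
      rw [hrec]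
      cases hx : g s with
      | none => rfl
      | some u =>
        have hu : r ≤ u := hlb s (by simp) u hx
        simp [pvOmin]; omega

-- ---- the first-match search as an argmin over sources ----

lemma pvSearch_rank (srcs : List String) (R : List (Int × List Char))
    (hinc : List.Pairwise (fun p q : Int × List Char => p.1 < q.1) R) :
    pvSearch srcs (R.map Prod.snd) =
      (match pvFold (fun s => pvM0 R s) srcs with
       | none => []
       | some m => srcs.filter (fun s => pvM0 R s == some m)) := by
  induction R with
  | nil =>
    rw [pvFold_none _ _ (fun s _ => pvM0_nil s)]
    rfl
  | cons p R ih =>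
    rw [List.pairwise_cons] at hinc
    obtain ⟨hr, hinc'⟩ := hinc
    rw [List.map_cons]
    show (if pvMatches srcs p.2 = [] then pvSearch srcs (R.map Prod.snd) else pvMatches srcs p.2) = _
    by_cases hM : pvMatches srcs p.2 = []
    · have hall : ∀ s ∈ srcs, pvCont p.2 s = false := by
        intro s hs
        have := (List.filter_eq_nil_iff.mp (by rw [← pvMatches_eq]; exact hM)) s hs
        simpa using this
      have heq : ∀ s ∈ srcs, pvM0 (p :: R) s = pvM0 R s := by
        intro s hs; rw [pvM0_cons, hall s hs]; simp
      rw [if_pos hM, ih hinc',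
        pvFold_congr (fun s => pvM0 (p :: R) s) (fun s => pvM0 R s) srcs heq]
      cases hfold : pvFold (fun s => pvM0 R s) srcs with
      | none => rfl
      | some m =>
        exact (List.filter_congr (fun s hs => by rw [heq s hs])).symm
    · -- some source contains p.2
      have hex : ∃ s0 ∈ srcs, pvCont p.2 s0 = true := by
        by_contra hno
        push Not at hno
        exact hM (List.filter_eq_nil_iff.mpr (by
          intro s hs
          simpa using hno s hs))
      obtain ⟨s0, hs0, hc0⟩ := hex
      -- facts about pvM0 on the cons list
      have f1 : ∀ s : String, pvCont p.2 s = true → pvM0 (p :: R) s = some p.1 := by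
        intro s hc
        rw [pvM0_cons, if_pos hc]
        cases hx : pvM0 R s with
        | none => rfl
        | some w =>
          obtain ⟨q, hq, hqv⟩ := pvM0_mem R s w hx
          have : p.1 < w := hqv ▸ hr q hq
          simp [pvOmin]; omega
      have f3 : ∀ (s : String) (v : Int), pvM0 (p :: R) s = some v → p.1 ≤ v := by
        intro s v hv
        by_cases hc : pvCont p.2 s = true
        · rw [f1 s hc] at hv; simp at hv; omega
        · rw [pvM0_cons, if_neg hc] at hv
          obtain ⟨q, hq, hqv⟩ := pvM0_mem R s v hv
          have : p.1 < v := hqv ▸ hr q hq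
          omega
      have hfold : pvFold (fun s => pvM0 (p :: R) s) srcs = some p.1 :=
        pvFold_min _ srcs s0 p.1 hs0 (f1 s0 hc0) (fun s _ v hv => f3 s v hv)
      rw [if_neg hM, hfold]
      rw [pvMatches_eq]
      refine List.filter_congr (fun s hs => ?_)
      by_cases hc : pvCont p.2 s = true
      · simp [hc, f1 s hc]
      · have hne : pvM0 (p :: R) s ≠ some p.1 := by
          intro hv
          rw [pvM0_cons, if_neg hc] at hv
          obtain ⟨q, hq, hqv⟩ := pvM0_mem R s p.1 hv
          have := hr q hq
          omega
        simp [hc, hne]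

-- ---- structure of the ranked candidate list ----

lemma pvMap_snd_rankGen (t : List Char) (thr : Nat) (idxs : List Int) :
    (pvRankGen t thr idxs).map Prod.snd = pvGen t thr idxs := by
  induction idxs with
  | nil => rfl
  | cons i rest ih =>
    simp only [pvRankGen, pvGen, List.map_append]
    rw [ih]
    by_cases he : (PySem.List.slice t (some i) none).length > thr <;>
      by_cases hb : (PySem.List.slice t none (some (-i))).length > thr <;>
      simp [he, hb]

lemma pvRankGen_mem (t : List Char) (thr : Nat) (idxs : List Int) :
    ∀ p ∈ pvRankGen t thr idxs, ∃ i ∈ idxs, p.1 = 2 * i ∨ p.1 = 2 * i + 1 := by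
  induction idxs with
  | nil => intro p hp; simp [pvRankGen] at hp
  | cons i rest ih =>
    intro p hp
    simp only [pvRankGen, List.mem_append] at hp
    rcases hp with (hp | hp) | hp
    · rw [List.mem_ite_nil_right, List.mem_singleton] at hp
      exact ⟨i, by simp, Or.inl (by simp [hp.2])⟩
    · rw [List.mem_ite_nil_right, List.mem_singleton] at hp
      exact ⟨i, by simp, Or.inr (by simp [hp.2])⟩
    · obtain ⟨j, hj, hr⟩ := ih p hp
      exact ⟨j, by simp [hj], hr⟩

lemma pvRankGen_pairwise (t : List Char) (thr : Nat) (idxs : List Int)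
    (h : List.Pairwise (· < ·) idxs) :
    List.Pairwise (fun p q : Int × List Char => p.1 < q.1) (pvRankGen t thr idxs) := by
  induction idxs with
  | nil => simp [pvRankGen]
  | cons i rest ih =>
    rw [List.pairwise_cons] at h
    obtain ⟨hi, hrest⟩ := h
    have hcross : ∀ q ∈ pvRankGen t thr rest, 2 * i + 1 < q.1 := by
      intro q hq
      obtain ⟨j, hj, hr⟩ := pvRankGen_mem t thr rest q hq
      have := hi j hj
      omega
    simp only [pvRankGen]
    refine List.pairwise_append.mpr ⟨List.pairwise_append.mpr ⟨?_, ?_, ?_⟩, ih hrest, ?_⟩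
    · split <;> simp
    · split <;> simp
    · intro a ha b hb
      rw [List.mem_ite_nil_right, List.mem_singleton] at ha
      rw [List.mem_ite_nil_right, List.mem_singleton] at hb
      rw [ha.2, hb.2]
      dsimp only
      omega
    · intro a ha b hb
      have := hcross b hb
      rcases List.mem_append.mp ha with ha | ha <;>
        rw [List.mem_ite_nil_right, List.mem_singleton] at ha <;>
        rw [ha.2] <;> dsimp only <;> omega

lemma pvM0_rankGen (t : List Char) (thr : Nat) (idxs : List Int) (s : String) :
    pvM0 (pvRankGen t thr idxs) s
      = pvOmin (pvM0 (pvSufPart t thr idxs) s) (pvM0 (pvPrePart t thr idxs) s) := by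
  induction idxs with
  | nil => rfl
  | cons i rest ih =>
    simp only [pvRankGen, pvSufPart, pvPrePart]
    rw [pvM0_append, pvM0_append, pvM0_append, pvM0_append, ih, pvOmin_shuffle']

lemma pvSufPart_append (t : List Char) (thr : Nat) (L1 L2 : List Int) :
    pvSufPart t thr (L1 ++ L2) = pvSufPart t thr L1 ++ pvSufPart t thr L2 := by
  induction L1 with
  | nil => rfl
  | cons i rest ih => simp only [List.cons_append, pvSufPart, ih, List.append_assoc]

lemma pvPrePart_append (t : List Char) (thr : Nat) (L1 L2 : List Int) :
    pvPrePart t thr (L1 ++ L2) = pvPrePart t thr L1 ++ pvPrePart t thr L2 := by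
  induction L1 with
  | nil => rfl
  | cons i rest ih => simp only [List.cons_append, pvPrePart, ih, List.append_assoc]

lemma pvSufPart_eq_map (t : List Char) (thr : Nat) (L : List Int)
    (h : ∀ i ∈ L, (PySem.List.slice t (some i) none).length > thr) :
    pvSufPart t thr L = L.map (fun i => (2 * i, PySem.List.slice t (some i) none)) := by
  induction L with
  | nil => rfl
  | cons i rest ih =>
    simp only [pvSufPart, List.map_cons, if_pos (h i (by simp)),
      ih (fun x hx => h x (by simp [hx]))]
    rfl

lemma pvSufPart_eq_nil (t : List Char) (thr : Nat) (L : List Int)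
    (h : ∀ i ∈ L, ¬ (PySem.List.slice t (some i) none).length > thr) :
    pvSufPart t thr L = [] := by
  induction L with
  | nil => rfl
  | cons i rest ih =>
    simp only [pvSufPart, if_neg (h i (by simp)),
      ih (fun x hx => h x (by simp [hx]))]
    rfl

lemma pvPrePart_eq_map (t : List Char) (thr : Nat) (L : List Int)
    (g : Int → Int × List Char)
    (h : ∀ i ∈ L,
      (if (PySem.List.slice t none (some (-i))).length > thr
        then [(2 * i + 1, PySem.List.slice t none (some (-i)))] else []) = [g i]) :
    pvPrePart t thr L = L.map g := by
  induction L with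
  | nil => rfl
  | cons i rest ih =>
    simp only [pvPrePart, List.map_cons, h i (by simp),
      ih (fun x hx => h x (by simp [hx]))]
    rfl

lemma pvPrePart_eq_nil (t : List Char) (thr : Nat) (L : List Int)
    (h : ∀ i ∈ L, ¬ (PySem.List.slice t none (some (-i))).length > thr) :
    pvPrePart t thr L = [] := by
  induction L with
  | nil => rfl
  | cons i rest ih =>
    simp only [pvPrePart, if_neg (h i (by simp)),
      ih (fun x hx => h x (by simp [hx]))]
    rfl

-- ---- the concrete suffix / prefix candidate lists ----

lemma pvSufPart_range (t : List Char) :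
    pvSufPart t (t.length / 2) (PySem.List.pyRange 0 (t.length : Int) 1)
      = pvRsuf t ((t.length - t.length / 2 : Nat) : Int) := by
  set n := t.length with hn
  have hsplit := PySem.List.pyRange_one_append 0 ((n - n / 2 : Nat) : Int) (n : Int)
    (by positivity) (by exact_mod_cast Nat.cast_le.mpr (Nat.sub_le _ _))
  rw [hsplit, pvSufPart_append]
  rw [pvSufPart_eq_map t (n / 2) _ (by
    intro i hi
    rw [PySem.List.mem_pyRange_one] at hi
    rw [PySem.List.slice_from t hi.1]
    simp only [List.length_drop]
    omega)]
  rw [pvSufPart_eq_nil t (n / 2) _ (by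
    intro i hi
    rw [PySem.List.mem_pyRange_one] at hi
    have h0 : (0 : Int) ≤ i := le_trans (by positivity) hi.1
    rw [PySem.List.slice_from t h0]
    simp only [List.length_drop]
    omega)]
  rw [List.append_nil]
  rfl

lemma pvPrePart_range (t : List Char) :
    pvPrePart t (t.length / 2) (PySem.List.pyRange 0 (t.length : Int) 1)
      = pvRpre t (t.length : Int) ((t.length - t.length / 2 : Nat) : Int) := by
  set n := t.length with hn
  rcases Nat.eq_zero_or_pos n with h0 | hpos
  · rw [h0]
    norm_num [PySem.List.pyRange_one_eq_nil (le_refl (0 : Int)), pvRpre,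
      PySem.List.pyRange_one_eq_nil (by norm_num : (0 : Int) ≤ 1)]
    rfl
  · have hk1 : (1 : Int) ≤ ((n - n / 2 : Nat) : Int) := by
      have : 1 ≤ n - n / 2 := by omega
      exact_mod_cast Nat.one_le_cast.mpr this
    have hkn : ((n - n / 2 : Nat) : Int) ≤ (n : Int) := by
      exact_mod_cast Nat.cast_le.mpr (Nat.sub_le _ _)
    rw [PySem.List.pyRange_one_append 0 1 (n : Int) (by norm_num)
      (le_trans hk1 hkn)]
    rw [PySem.List.pyRange_one_append 1 ((n - n / 2 : Nat) : Int) (n : Int) hk1 hkn]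
    rw [pvPrePart_append, pvPrePart_append]
    have hzs : (0 : Int) + 1 = 1 := by norm_num
    rw [show (PySem.List.pyRange 0 1 1) = [(0 : Int)] from by
      simpa using PySem.List.pyRange_one_singleton 0]
    have hz : pvPrePart t (n / 2) [(0 : Int)] = [] := by
      refine pvPrePart_eq_nil t (n / 2) _ ?_
      intro i hi
      simp only [List.mem_singleton] at hi
      subst hi
      rw [show (-(0 : Int)) = 0 from by norm_num, PySem.List.slice_to t (le_refl 0)]
      simp
    rw [hz, List.nil_append]
    rw [pvPrePart_eq_map t (n / 2) _
      (fun i => (2 * i + 1, PySem.List.slice t none (some ((n : Int) - i)))) (by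
      intro i hi
      rw [PySem.List.mem_pyRange_one] at hi
      have hknat : ((i.toNat : Int)) = i := Int.toNat_of_nonneg (by omega)
      rw [← hknat, PySem.List.slice_to_neg_natCast t i.toNat (by omega)]
      have hcond : (List.take (t.length - i.toNat) t).length > n / 2 := by
        simp only [List.length_take, ← hn]
        omega
      rw [if_pos (by simpa [hn] using hcond)]
      dsimp only
      rw [PySem.List.slice_to t (by omega : (0 : Int) ≤ (n : Int) - (i.toNat : Int))]
      have : ((n : Int) - (i.toNat : Int)).toNat = n - i.toNat := by omega
      rw [this, hn])]
    rw [pvPrePart_eq_nil t (n / 2) _ (by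
      intro i hi
      rw [PySem.List.mem_pyRange_one] at hi
      have hknat : ((i.toNat : Int)) = i := Int.toNat_of_nonneg (le_trans (by positivity) hi.1)
      rw [← hknat, PySem.List.slice_to_neg_natCast t i.toNat (by omega)]
      simp only [List.length_take, ← hn]
      omega)]
    rw [List.append_nil]
    rfl

lemma pvRsuf_pairwise (t : List Char) (keep : Int) :
    List.Pairwise (fun p q : Int × List Char => p.1 < q.1) (pvRsuf t keep) := by
  rw [pvRsuf, List.pairwise_map]
  exact (PySem.List.pairwise_lt_pyRange_one 0 keep).imp (by intro a b h; dsimp only; omega)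

lemma pvRpre_pairwise (t : List Char) (n keep : Int) :
    List.Pairwise (fun p q : Int × List Char => p.1 < q.1) (pvRpre t n keep) := by
  rw [pvRpre, List.pairwise_map]
  exact (PySem.List.pairwise_lt_pyRange_one 1 keep).imp (by intro a b h; dsimp only; omega)

-- ---- B's scoring loops compute pvM0 on those lists ----

lemma pvScoreLoop1_eq (t src : List Char) :
    ∀ (Ls : List Int) (best : Int),
      pvScoreLoop1 t src Ls best =
        (Ls.findSome? (fun i =>
          if PySem.Chars.isIn (PySem.List.slice t (some i) none) src = true
            then some (2 * i) else none)).getD best := by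
  intro Ls
  induction Ls with
  | nil => intro best; rfl
  | cons i rest ih =>
    intro best
    simp only [pvScoreLoop1, List.findSome?_cons]
    by_cases h : PySem.Chars.isIn (PySem.List.slice t (some i) none) src = true
    · simp [h]
    · simp only [if_neg h, ih]

lemma pvScoreLoop2_eq (t src : List Char) (n : Int) :
    ∀ (Ls : List Int) (best : Int),
      pvScoreLoop2 t src n Ls best =
        (Ls.findSome? (fun i =>
          if PySem.Chars.isIn (PySem.List.slice t none (some (n - i))) src = true
            then some (2 * i + 1) else none)).elim best (fun r => min best r) := by
  intro Ls
  induction Ls with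
  | nil => intro best; rfl
  | cons i rest ih =>
    intro best
    simp only [pvScoreLoop2, List.findSome?_cons]
    by_cases h : PySem.Chars.isIn (PySem.List.slice t none (some (n - i))) src = true
    · simp [h]
    · simp only [if_neg h, ih]

lemma pvM0_rsuf (t : List Char) (keep : Int) (s : String) :
    pvM0 (pvRsuf t keep) s =
      (PySem.List.pyRange 0 keep 1).findSome? (fun i =>
        if PySem.Chars.isIn (PySem.List.slice t (some i) none) s.toList = true
          then some (2 * i) else none) := by
  rw [pvM0_findSome _ _ (pvRsuf_pairwise t keep), pvRsuf, List.findSome?_map]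
  rfl

lemma pvM0_rpre (t : List Char) (n keep : Int) (s : String) :
    pvM0 (pvRpre t n keep) s =
      (PySem.List.pyRange 1 keep 1).findSome? (fun i =>
        if PySem.Chars.isIn (PySem.List.slice t none (some (n - i))) s.toList = true
          then some (2 * i + 1) else none) := by
  rw [pvM0_findSome _ _ (pvRpre_pairwise t n keep), pvRpre, List.findSome?_map]
  rfl

lemma pvScore_eq (t : List Char) (keep : Int) (s : String)
    (hkeep : 0 ≤ keep ∧ keep ≤ (t.length : Int)) :
    pvScore t (t.length : Int) keep (2 * (t.length : Int) + 2) s.toList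
      = (pvOmin (pvM0 (pvRsuf t keep) s) (pvM0 (pvRpre t (t.length : Int) keep) s)).getD
          (2 * (t.length : Int) + 2) := by
  simp only [pvScore]
  rw [pvScoreLoop1_eq, pvScoreLoop2_eq, pvM0_rsuf, pvM0_rpre]
  cases hps : (PySem.List.pyRange 1 keep 1).findSome? (fun i =>
      if PySem.Chars.isIn (PySem.List.slice t none (some ((t.length : Int) - i))) s.toList = true
        then some (2 * i + 1) else none) with
  | none =>
    cases hss : (PySem.List.pyRange 0 keep 1).findSome? (fun i =>
        if PySem.Chars.isIn (PySem.List.slice t (some i) none) s.toList = true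
          then some (2 * i) else none) <;> simp [pvOmin]
  | some r =>
    have hr : r < 2 * (t.length : Int) + 2 := by
      obtain ⟨i, hi, hfi⟩ := List.exists_of_findSome?_eq_some hps
      rw [PySem.List.mem_pyRange_one] at hi
      by_cases hc : PySem.Chars.isIn (PySem.List.slice t none (some ((t.length : Int) - i))) s.toList = true
      · rw [if_pos hc] at hfi
        have : 2 * i + 1 = r := by simpa using hfi
        omega
      · rw [if_neg hc] at hfi; simp at hfi
    cases hss : (PySem.List.pyRange 0 keep 1).findSome? (fun i =>
        if PySem.Chars.isIn (PySem.List.slice t (some i) none) s.toList = true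
          then some (2 * i) else none) with
    | none => simp [pvOmin]; omega
    | some v => simp [pvOmin]

-- ---- bridging Source B's min(...)/zip/filter to pvFold ----

lemma pvFoldr_omin_mem : ∀ (O : List (Option Int)) (z : Int),
    O.foldr pvOmin none = some z → ∃ o ∈ O, o = some z := by
  intro O
  induction O with
  | nil => intro z h; simp at h
  | cons o rest ih =>
    intro z h
    simp only [List.foldr_cons] at h
    cases ho : o with
    | none =>
      rw [ho] at h
      obtain ⟨o', ho', hz⟩ := ih z (by simpa [pvOmin] using h)
      exact ⟨o', by simp [ho'], hz⟩
    | some w =>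
      rw [ho] at h
      cases hR : rest.foldr pvOmin none with
      | none =>
        rw [hR] at h
        exact ⟨some w, by simp, by simpa [pvOmin] using h⟩
      | some y =>
        rw [hR] at h
        simp only [pvOmin, Option.some.injEq] at h
        rcases le_total w y with hle | hle
        · exact ⟨some w, by simp, by rw [← h, min_eq_left hle]⟩
        · obtain ⟨o', ho', hz⟩ := ih y hR
          exact ⟨o', by simp [ho'], by rw [hz, ← h, min_eq_right hle]⟩

lemma pvFoldlMin (inf : Int) : ∀ (O : List (Option Int)) (x : Int), x ≤ inf →
    (∀ v : Int, some v ∈ O → v < inf) →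
    (O.map (fun o => o.getD inf)).foldl min x
      = (O.foldr pvOmin none).elim x (fun v => min x v) := by
  intro O
  induction O with
  | nil => intro x hx _; rfl
  | cons o rest ih =>
    intro x hx hv
    have hv' : ∀ v : Int, some v ∈ rest → v < inf := fun v h => hv v (by simp [h])
    simp only [List.map_cons, List.foldl_cons, List.foldr_cons]
    cases o with
    | none =>
      rw [Option.getD_none, min_eq_left hx, ih x hx hv']
      cases hR : rest.foldr pvOmin none with
      | none => simp [pvOmin]
      | some z => simp [pvOmin]
    | some w =>
      have hw : w < inf := hv w (by simp)
      rw [Option.getD_some, ih (min x w) (by omega) hv']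
      cases hR : rest.foldr pvOmin none with
      | none => simp [pvOmin]
      | some z => simp [pvOmin]

lemma pvMinD_eq (g : String → Option Int) (inf : Int) (srcs : List String)
    (hb : ∀ (s : String) (v : Int), g s = some v → v < inf) :
    PySem.List.minD (srcs.map (fun s => (g s).getD inf)) (fun x => x) inf
      = (pvFold g srcs).getD inf := by
  cases srcs with
  | nil => rfl
  | cons s0 rest =>
    simp only [List.map_cons, PySem.List.minD, PySem.List.min?_id_cons, Option.getD_some]
    have hx : (g s0).getD inf ≤ inf := by
      cases h0 : g s0 with
      | none => simp
      | some v => simpa using le_of_lt (hb s0 v h0)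
    have hrest : ∀ v : Int, some v ∈ rest.map g → v < inf := by
      intro v hv
      obtain ⟨s, _, hgs⟩ := List.mem_map.mp hv
      exact hb s v hgs
    rw [show rest.map (fun s => (g s).getD inf) = (rest.map g).map (fun o => o.getD inf) from by
      rw [List.map_map]; rfl]
    rw [pvFoldlMin inf (rest.map g) ((g s0).getD inf) hx hrest]
    have hFold : pvFold g (s0 :: rest) = pvOmin (g s0) ((rest.map g).foldr pvOmin none) := by
      simp only [pvFold, List.foldr_cons, List.foldr_map]
    rw [hFold]
    cases h0 : g s0 with
    | none =>
      cases hR : (rest.map g).foldr pvOmin none with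
      | none => simp [pvOmin]
      | some z =>
        obtain ⟨o, ho, hoz⟩ := pvFoldr_omin_mem _ z hR
        have hz : z < inf := hrest z (hoz ▸ ho)
        simp [pvOmin]
        omega
    | some w =>
      have hw : w < inf := hb s0 w h0
      cases hR : (rest.map g).foldr pvOmin none with
      | none => simp [pvOmin]
      | some z => simp [pvOmin]

lemma pvZipFilter (l : List String) (f : String → Int) (m : Int) :
    ((l.zip (l.map f)).filter (fun p => p.2 == m)).map Prod.fst
      = l.filter (fun s => f s == m) := by
  induction l with
  | nil => rfl
  | cons a rest ih =>
    simp only [List.map_cons, List.zip_cons_cons, List.filter_cons]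
    by_cases h : (f a == m) = true
    · simpa [h] using ih
    · simpa [h] using ih

-- every rank in A's ranked candidate list is below the sentinel 2n+2
lemma pvRank_lt (t : List Char) (s : String) :
    ∀ v : Int, pvM0 (pvRankGen t (t.length / 2) (PySem.List.pyRange 0 (t.length : Int) 1)) s = some v →
      v < 2 * (t.length : Int) + 2 := by
  intro v h
  obtain ⟨p, hp, hpv⟩ := pvM0_mem _ _ v h
  obtain ⟨i, hi, hr⟩ := pvRankGen_mem _ _ _ p hp
  rw [PySem.List.mem_pyRange_one] at hi
  omega

-- ===== VERDICT (by name: the statement is the Claim_ definition above) =====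
theorem search_text_in_text_list_spec : Claim_equal_search_text_in_text_list := by
  intro st srcs _
  show search_text_in_text_list st srcs = search_text_in_text_list_alt st srcs
  simp only [search_text_in_text_list_alt]
  set t := PySem.Chars.strip st.toList with ht
  have hkeepport : (t.length : Int) - PySem.Int.floordiv (t.length : Int) 2
      = ((t.length - t.length / 2 : Nat) : Int) := by
    rw [PySem.Int.floordiv_eq_ediv_of_pos (by norm_num)]
    omega
  simp only [hkeepport]
  -- B's per-source score is the minimum contained rank in A's ranked candidate list
  have hscore : ∀ s : String,
      pvScore t (t.length : Int) ((t.length - t.length / 2 : Nat) : Int)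
          (2 * (t.length : Int) + 2) s.toList
        = (pvM0 (pvRankGen t (t.length / 2) (PySem.List.pyRange 0 (t.length : Int) 1)) s).getD
            (2 * (t.length : Int) + 2) := by
    intro s
    rw [pvScore_eq t _ s ⟨by positivity, by exact_mod_cast Nat.cast_le.mpr (Nat.sub_le _ _)⟩]
    rw [← pvSufPart_range t, ← pvPrePart_range t, ← pvM0_rankGen]
  simp only [hscore]
  -- A reduces to the abstract first-match search over the ranked candidates
  have hA : search_text_in_text_list st srcs
      = pvSearch srcs ((pvRankGen t (t.length / 2)
          (PySem.List.pyRange 0 (t.length : Int) 1)).map Prod.snd) := by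
    simp only [search_text_in_text_list, pvSubSentences, if_true, ← ht]
    rw [pvSearchLoop_eq, pvGenLoop_true, List.nil_append,
      pvSearch_dedup srcs _ [] (by intro c hc; cases hc), pvMap_snd_rankGen]
  rw [hA, pvSearch_rank srcs _
    (pvRankGen_pairwise t (t.length / 2) _ (PySem.List.pairwise_lt_pyRange_one 0 (t.length : Int)))]
  rw [pvMinD_eq _ _ srcs (fun s v hv => pvRank_lt t s v hv)]
  cases hfold : pvFold (fun s =>
      pvM0 (pvRankGen t (t.length / 2) (PySem.List.pyRange 0 (t.length : Int) 1)) s) srcs with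
  | none => simp
  | some m =>
    have hm : m < 2 * (t.length : Int) + 2 := by
      have := pvFoldr_omin_mem (srcs.map (fun s =>
        pvM0 (pvRankGen t (t.length / 2) (PySem.List.pyRange 0 (t.length : Int) 1)) s)) m
        (by rw [List.foldr_map]; exact hfold)
      obtain ⟨o, ho, hoz⟩ := this
      obtain ⟨s, _, hgs⟩ := List.mem_map.mp ho
      exact pvRank_lt t s m (by rw [hgs, hoz])
    rw [Option.getD_some, if_neg (by omega)]
    rw [pvZipFilter srcs _ m]
    refine (List.filter_congr (fun s _ => ?_)).symm
    cases hms : pvM0 (pvRankGen t (t.length / 2) (PySem.List.pyRange 0 (t.length : Int) 1)) s with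
    | none =>
      have : ¬ (2 * (t.length : Int) + 2 == m) = true := by simp; omega
      simp [this]
    | some v => simp
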